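-- pv_equiv track=rewrite | github.com/GetKlai/klai | tests/caddy/test_caddyfile_strips_internal_headers.py | _extract_reverse_proxy_blocks
-- ===== SOURCE A (Python) =====
-- def _extract_reverse_proxy_blocks(text: str) -> list[tuple[int, str]]:
--     """Return (line_number, block_text) for every reverse_proxy directive.
--
--     Each block is the ``reverse_proxy <upstream> { ... }`` span.
--     Single-line ``reverse_proxy <upstream>`` (no braces) are also returned
--     as single-line blocks — they have no header_up directives, which will
--     cause the test to fail as intended.
--     """
--     blocks: list[tuple[int, str]] = []
--     lines = text.splitlines()
--     i = 0
--     while i < len(lines):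
--         stripped = lines[i].lstrip()
--         if not stripped.startswith("reverse_proxy "):
--             i += 1
--             continue
--         line_no = i + 1  # 1-based for error messages
--         # Look-ahead: is there an opening brace on the same line or next?
--         rest = stripped
--         brace_depth = rest.count("{") - rest.count("}")
--         block_lines = [rest]
--         j = i + 1
--         if brace_depth > 0:
--             while j < len(lines) and brace_depth > 0:
--                 l = lines[j]
--                 brace_depth += l.count("{") - l.count("}")
--                 block_lines.append(l.strip())
--                 j += 1
--         blocks.append((line_no, "\n".join(block_lines)))
--         i = j if j > i + 1 else i + 1
--     return blocks
-- ===== SOURCE B (Python) =====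
-- def _extract_reverse_proxy_blocks(text: str) -> list[tuple[int, str]]:
--     """Single flat state-machine pass over the lines (no index jumping)."""
--     blocks: list[tuple[int, str]] = []
--     in_block = False
--     acc: list[str] = []
--     start = 0
--     depth = 0
--     for i, line in enumerate(text.splitlines()):
--         if in_block:
--             depth += line.count("{") - line.count("}")
--             acc = acc + [line.strip()]
--             if depth <= 0:
--                 blocks.append((start, "\n".join(acc)))
--                 in_block = False
--         else:
--             s = line.lstrip()
--             if s.startswith("reverse_proxy "):
--                 d = s.count("{") - s.count("}")
--                 if d > 0:
--                     in_block = True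
--                     acc = [s]
--                     start = i + 1
--                     depth = d
--                 else:
--                     blocks.append((i + 1, s))
--     if in_block:
--         blocks.append((start, "\n".join(acc)))
--     return blocks
-- ===== Notes on version B (the rewrite author's own statement) =====
-- stated objective: simpler
-- what changed: Replaced the nested index-jumping while loops (outer cursor plus inner look-ahead loop with i=j backpatching) by one flat state-machine pass over enumerate(lines) maintaining in_block/accumulator/brace-depth, with an EOF flush for unterminated blocks.
import Mathlib
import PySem

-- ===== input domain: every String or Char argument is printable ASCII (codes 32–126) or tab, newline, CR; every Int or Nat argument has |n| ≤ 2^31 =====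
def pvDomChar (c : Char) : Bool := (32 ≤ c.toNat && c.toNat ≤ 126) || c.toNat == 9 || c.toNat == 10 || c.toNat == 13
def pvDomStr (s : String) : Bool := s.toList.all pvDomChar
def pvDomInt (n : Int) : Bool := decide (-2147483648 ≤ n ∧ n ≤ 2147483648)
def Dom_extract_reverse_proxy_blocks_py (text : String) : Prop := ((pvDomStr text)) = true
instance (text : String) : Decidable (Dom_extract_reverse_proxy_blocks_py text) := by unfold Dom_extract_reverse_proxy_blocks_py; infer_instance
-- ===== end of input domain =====

-- B replaces A's nested index-jumping while loops by one flat state-machine pass over enumerate(lines); same return value, simpler control flow.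

-- shared helper: l.count("{") - l.count("}") (both Pythons compute exactly this expression)
def pvBrace (l : String) : Int := (PySem.Str.count l "{" : Int) - (PySem.Str.count l "}" : Int)

-- ===== PORT A =====
-- inner look-ahead loop: while j < len(lines) and brace_depth > 0
def pvAInner (lines : List String) (j : Nat) (depth : Int) (acc : List String) : Nat × List String :=
  if h : j < lines.length ∧ depth > 0 then
    pvAInner lines (j + 1) (depth + pvBrace lines[j]) (acc ++ [PySem.Str.strip lines[j]])
  else (j, acc)
termination_by lines.length - j
decreasing_by omega

-- outer loop: while i < len(lines); at the end i := j if j > i + 1 else i + 1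
def pvALoop (lines : List String) (i : Nat) (blocks : List (Int × String)) : List (Int × String) :=
  if h : i < lines.length then
    let stripped := PySem.Str.lstrip lines[i]
    if PySem.Str.startswith stripped "reverse_proxy " then
      let r := if pvBrace stripped > 0 then pvAInner lines (i + 1) (pvBrace stripped) [stripped]
               else (i + 1, ([stripped] : List String))
      pvALoop lines (if r.1 > i + 1 then r.1 else i + 1)
        (blocks ++ [(((i : Int) + 1), PySem.Str.join "\n" r.2)])
    else pvALoop lines (i + 1) blocks
  else blocks
termination_by lines.length - i
decreasing_by all_goals ((repeat' split) <;> omega)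

def extract_reverse_proxy_blocks_py (text : String) : List (Int × String) :=
  pvALoop (PySem.Str.splitlines text) 0 []

-- ===== PORT B =====
-- the state of B's flat pass: output so far, in-block flag, block accumulator, saved 1-based line number, brace depth
structure PvSt where
  blocks : List (Int × String)
  inb : Bool
  acc : List String
  start : Int
  depth : Int
deriving Repr, DecidableEq

def pvBStep (st : PvSt) (p : Int × String) : PvSt :=
  if st.inb then
    let depth' := st.depth + pvBrace p.2
    let acc' := st.acc ++ [PySem.Str.strip p.2]
    if depth' ≤ 0 then
      { st with blocks := st.blocks ++ [(st.start, PySem.Str.join "\n" acc')],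
                inb := false, acc := acc', depth := depth' }
    else { st with acc := acc', depth := depth' }
  else
    let s := PySem.Str.lstrip p.2
    if PySem.Str.startswith s "reverse_proxy " then
      let d := pvBrace s
      if d > 0 then { st with inb := true, acc := [s], start := p.1 + 1, depth := d }
      else { st with blocks := st.blocks ++ [(p.1 + 1, s)] }
    else st

-- final `if in_block:` flush of an unterminated block
def pvFlush (st : PvSt) : List (Int × String) :=
  if st.inb then st.blocks ++ [(st.start, PySem.Str.join "\n" st.acc)] else st.blocks

def extract_reverse_proxy_blocks_py_alt (text : String) : List (Int × String) :=
  pvFlush ((PySem.List.enumerate (PySem.Str.splitlines text) 0).foldl pvBStep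
    { blocks := [], inb := false, acc := [], start := 0, depth := 0 })

-- ===== PRECONDITION & SPEC =====
def Spec_extract_reverse_proxy_blocks_py (text : String) (out : List (Int × String)) : Prop := out = extract_reverse_proxy_blocks_py_alt text
instance (text : String) (out : List (Int × String)) : Decidable (Spec_extract_reverse_proxy_blocks_py text out) := by unfold Spec_extract_reverse_proxy_blocks_py; infer_instance

-- ===== CLAIM (what is proved, stated in full; the proofs are below) =====
def Claim_equal_extract_reverse_proxy_blocks_py : Prop := ∀ (text : String), Dom_extract_reverse_proxy_blocks_py text → Spec_extract_reverse_proxy_blocks_py text (extract_reverse_proxy_blocks_py text)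

-- ===== LEMMAS AND PROOFS =====

-- with inb = false, the fold result (after flush) does not depend on the junk fields acc/start/depth
theorem pvFlush_foldl_junk (l : List (Int × String)) (blocks : List (Int × String))
    (a a' : List String) (s s' d d' : Int) :
    pvFlush (l.foldl pvBStep ⟨blocks, false, a, s, d⟩) =
    pvFlush (l.foldl pvBStep ⟨blocks, false, a', s', d'⟩) := by
  induction l generalizing blocks a a' s s' d d' with
  | nil => rfl
  | cons p t ih =>
      simp only [List.foldl_cons, pvBStep]
      simp only [Bool.false_eq_true, if_false]
      split
      · split
        · rfl
        · exact ih _ _ _ _ _ _ _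
      · exact ih _ _ _ _ _ _ _

-- A's inner look-ahead loop never moves its cursor backwards
theorem pvAInner_ge (lines : List String) (j : Nat) (depth : Int) (acc : List String) :
    j ≤ (pvAInner lines j depth acc).1 := by
  induction j, depth, acc using pvAInner.induct lines with
  | case1 j depth acc h ih => rw [pvAInner, dif_pos h]; omega
  | case2 j depth acc h => rw [pvAInner, dif_neg h]

-- B's fold run from an in-block state reproduces A's inner loop (emitting the block, or flushing it at EOF)
-- and then continues from a not-in-block state at A's resume index
theorem pvBStep_inblock (lines : List String) (j : Nat) (depth : Int)
    (acc : List String) (blocks : List (Int × String)) (start : Int) :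
    depth > 0 →
    pvFlush ((PySem.List.enumerate (lines.drop j) (j : Int)).foldl pvBStep ⟨blocks, true, acc, start, depth⟩) =
    pvFlush ((PySem.List.enumerate (lines.drop (pvAInner lines j depth acc).1) ((pvAInner lines j depth acc).1 : Int)).foldl pvBStep
      ⟨blocks ++ [(start, PySem.Str.join "\n" (pvAInner lines j depth acc).2)], false, [], 0, 0⟩) := by
  induction j, depth, acc using pvAInner.induct lines with
  | case1 j depth acc h ih =>
      intro hd
      have hj := h.1
      rw [pvAInner, dif_pos h]
      rw [List.drop_eq_getElem_cons hj, PySem.List.enumerate_cons, List.foldl_cons]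
      have hstep : pvBStep ⟨blocks, true, acc, start, depth⟩ ((j : Int), lines[j]) =
          (if depth + pvBrace lines[j] ≤ 0 then
            (⟨blocks ++ [(start, PySem.Str.join "\n" (acc ++ [PySem.Str.strip lines[j]]))], false,
              acc ++ [PySem.Str.strip lines[j]], start, depth + pvBrace lines[j]⟩ : PvSt)
          else ⟨blocks, true, acc ++ [PySem.Str.strip lines[j]], start, depth + pvBrace lines[j]⟩) := by
        simp [pvBStep]
      rw [hstep]
      by_cases hc : depth + pvBrace lines[j] ≤ 0
      · simp only [hc, if_true]
        have hno : ¬ (j + 1 < lines.length ∧ depth + pvBrace lines[j] > 0) := by omega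
        have hstop : pvAInner lines (j + 1) (depth + pvBrace lines[j]) (acc ++ [PySem.Str.strip lines[j]]) = (j + 1, acc ++ [PySem.Str.strip lines[j]]) := by
          rw [pvAInner, dif_neg hno]
        rw [hstop]
        have hcast : ((j : Int) + 1) = ((j + 1 : Nat) : Int) := by push_cast; ring
        rw [hcast]
        exact pvFlush_foldl_junk _ _ _ _ _ _ _ _
      · simp only [hc, if_false]
        have hcast : ((j : Int) + 1) = ((j + 1 : Nat) : Int) := by push_cast; ring
        rw [hcast]
        exact ih (by omega)
  | case2 j depth acc h =>
      intro hd
      rw [pvAInner, dif_neg h]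
      have hj : lines.length ≤ j := by omega
      rw [List.drop_of_length_le hj]
      simp [PySem.List.enumerate, pvFlush]

-- main invariant: from any not-in-block position, A's outer loop equals B's fold over the remaining enumerated lines
theorem pvMain (n : Nat) : ∀ (lines : List String) (i : Nat) (blocks : List (Int × String)),
    lines.length ≤ i + n →
    pvALoop lines i blocks =
    pvFlush ((PySem.List.enumerate (lines.drop i) (i : Int)).foldl pvBStep ⟨blocks, false, [], 0, 0⟩) := by
  induction n with
  | zero =>
      intro lines i blocks hn
      rw [pvALoop, dif_neg (by omega)]
      rw [List.drop_of_length_le (by omega)]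
      simp [PySem.List.enumerate, pvFlush]
  | succ n ih =>
      intro lines i blocks hn
      by_cases h : i < lines.length
      · rw [pvALoop, dif_pos h]
        rw [List.drop_eq_getElem_cons h, PySem.List.enumerate_cons, List.foldl_cons]
        by_cases hsw : PySem.Str.startswith (PySem.Str.lstrip lines[i]) "reverse_proxy " = true
        · rw [if_pos hsw]
          by_cases hd : pvBrace (PySem.Str.lstrip lines[i]) > 0
          · simp only [if_pos hd]
            have hstep : pvBStep ⟨blocks, false, [], 0, 0⟩ ((i : Int), lines[i]) =
                ⟨blocks, true, [PySem.Str.lstrip lines[i]], (i : Int) + 1, pvBrace (PySem.Str.lstrip lines[i])⟩ := by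
              simp only [pvBStep, Bool.false_eq_true, if_false, if_pos hsw, if_pos hd]
            rw [hstep]
            have hcast : ((i : Int) + 1) = ((i + 1 : Nat) : Int) := by push_cast; ring
            rw [hcast, pvBStep_inblock lines (i + 1) _ _ blocks _ hd, ← hcast]
            have hge := pvAInner_ge lines (i + 1) (pvBrace (PySem.Str.lstrip lines[i])) [PySem.Str.lstrip lines[i]]
            have hk : (if (pvAInner lines (i + 1) (pvBrace (PySem.Str.lstrip lines[i])) [PySem.Str.lstrip lines[i]]).1 > i + 1
                then (pvAInner lines (i + 1) (pvBrace (PySem.Str.lstrip lines[i])) [PySem.Str.lstrip lines[i]]).1 else i + 1)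
                = (pvAInner lines (i + 1) (pvBrace (PySem.Str.lstrip lines[i])) [PySem.Str.lstrip lines[i]]).1 := by
              split <;> omega
            rw [hk]
            exact ih lines _ _ (by omega)
          · simp only [if_neg hd]
            have hstep : pvBStep ⟨blocks, false, [], 0, 0⟩ ((i : Int), lines[i]) =
                ⟨blocks ++ [((i : Int) + 1, PySem.Str.lstrip lines[i])], false, [], 0, 0⟩ := by
              simp only [pvBStep, Bool.false_eq_true, if_false, if_pos hsw, if_neg hd]
            rw [hstep]
            have hk : ¬ ((i + 1, [PySem.Str.lstrip lines[i]]).1 > i + 1) := by omega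
            rw [if_neg hk]
            have hjoin : PySem.Str.join "\n" [PySem.Str.lstrip lines[i]] = PySem.Str.lstrip lines[i] := by
              simp [PySem.Str.join, PySem.Str.lstrip]
            rw [hjoin]
            have hcast : ((i : Int) + 1) = ((i + 1 : Nat) : Int) := by push_cast; ring
            rw [hcast]
            exact ih lines _ _ (by omega)
        · rw [if_neg hsw]
          have hstep : pvBStep ⟨blocks, false, [], 0, 0⟩ ((i : Int), lines[i]) = ⟨blocks, false, [], 0, 0⟩ := by
            simp only [pvBStep, Bool.false_eq_true, if_false, if_neg hsw]
          rw [hstep]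
          have hcast : ((i : Int) + 1) = ((i + 1 : Nat) : Int) := by push_cast; ring
          rw [hcast]
          exact ih lines _ _ (by omega)
      · rw [pvALoop, dif_neg h]
        rw [List.drop_of_length_le (by omega)]
        simp [PySem.List.enumerate, pvFlush]

-- ===== VERDICT (by name: the statement is the Claim_ definition above) =====
theorem extract_reverse_proxy_blocks_py_spec : Claim_equal_extract_reverse_proxy_blocks_py := by
  intro text _
  unfold Spec_extract_reverse_proxy_blocks_py extract_reverse_proxy_blocks_py extract_reverse_proxy_blocks_py_alt
  simpa using pvMain (PySem.Str.splitlines text).length (PySem.Str.splitlines text) 0 [] (by omega)
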